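-- pv_equiv track=rewrite | github.com/AnumtaNaveed/Heart-Disease-Risk-Prediction-Model | HDRPM.py | calculate_min_max_ranges
-- ===== SOURCE A (Python) =====
-- def calculate_min_max_ranges(data):
--
--     # assigning the variables value of the very first patient to compare
--     min_age = data[0]["age"]
--     max_age = data[0]["age"]
--     min_chol = data[0]["chol"]
--     max_chol = data[0]["chol"]
--
--     for patient in data:
--         age = patient["age"]
--         chol = patient["chol"]
--
--         # finding max age value and min age value
--         if age < min_age:
--             min_age = age
--         if age > max_age:
--             max_age = age
--
--         # finding min chol value and max chol value
--         if chol < min_chol: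
--             min_chol = chol
--         if chol > max_chol:
--             max_chol = chol
--
--     return min_age, max_age, min_chol, max_chol
-- ===== SOURCE B (Python) =====
-- def calculate_min_max_ranges(data):
--     ages = [patient["age"] for patient in data]
--     chols = [patient["chol"] for patient in data]
--     return min(ages), max(ages), min(chols), max(chols)
-- ===== Notes on version B (the rewrite author's own statement) =====
-- stated objective: idiomatic
-- what changed: Replaces A's single interleaved comparison loop seeded from data[0] with two projected column lists reduced by the built-in min/max.
import Mathlib
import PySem

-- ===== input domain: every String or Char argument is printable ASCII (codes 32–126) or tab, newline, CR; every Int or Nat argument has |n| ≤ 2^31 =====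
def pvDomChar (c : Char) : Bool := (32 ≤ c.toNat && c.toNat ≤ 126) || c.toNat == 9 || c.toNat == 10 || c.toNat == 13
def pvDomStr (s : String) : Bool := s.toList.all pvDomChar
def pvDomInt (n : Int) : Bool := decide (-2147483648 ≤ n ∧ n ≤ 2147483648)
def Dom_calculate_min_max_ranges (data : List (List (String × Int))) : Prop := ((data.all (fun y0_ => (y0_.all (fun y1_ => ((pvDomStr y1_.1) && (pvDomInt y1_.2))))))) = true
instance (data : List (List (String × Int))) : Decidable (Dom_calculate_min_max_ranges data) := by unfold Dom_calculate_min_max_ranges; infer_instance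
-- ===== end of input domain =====

-- B replaces A's single interleaved comparison loop (seeded from data[0]) with two
-- projected column lists reduced by built-in min/max; equivalence proved on non-empty
-- data whose patients all carry "age" and "chol" keys (elsewhere Python A raises).


-- ===== PORT A =====
-- patient["k"]: first-match association-list lookup; getD 0 only fires outside Pre_
def pvKeyA (p : List (String × Int)) (k : String) : Int := (p.lookup k).getD 0

def calculate_min_max_ranges (data : List (List (String × Int))) : Int × Int × Int × Int :=
  let p0 := data.headD []          -- data[0] (IndexError on [] excluded by Pre_)
  let min_age := pvKeyA p0 "age"
  let max_age := pvKeyA p0 "age"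
  let min_chol := pvKeyA p0 "chol"
  let max_chol := pvKeyA p0 "chol"
  data.foldl (fun s patient =>
    let age := pvKeyA patient "age"
    let chol := pvKeyA patient "chol"
    let mia := if age < s.1 then age else s.1
    let maa := if age > s.2.1 then age else s.2.1
    let mic := if chol < s.2.2.1 then chol else s.2.2.1
    let mac := if chol > s.2.2.2 then chol else s.2.2.2
    (mia, maa, mic, mac)) (min_age, max_age, min_chol, max_chol)

-- ===== PORT B =====
def calculate_min_max_ranges_alt (data : List (List (String × Int))) : Int × Int × Int × Int :=
  let ages := data.map (fun patient => ((patient.lookup "age").getD 0))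
  let chols := data.map (fun patient => ((patient.lookup "chol").getD 0))
  ((PySem.List.min? ages (fun x => x)).getD 0, (PySem.List.max? ages (fun x => x)).getD 0,
   (PySem.List.min? chols (fun x => x)).getD 0, (PySem.List.max? chols (fun x => x)).getD 0)

-- ===== PRECONDITION & SPEC =====
-- Pre_ = exactly the inputs where Python A returns: data non-empty (else IndexError)
-- and every patient has both keys (else KeyError).
def Pre_calculate_min_max_ranges (data : List (List (String × Int))) : Prop :=
  data ≠ [] ∧ ∀ p ∈ data, (p.lookup "age").isSome ∧ (p.lookup "chol").isSome
instance (data : List (List (String × Int))) : Decidable (Pre_calculate_min_max_ranges data) := by unfold Pre_calculate_min_max_ranges; infer_instance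
def pvWitness_calculate_min_max_ranges : (List (List (String × Int))) :=
  [[("age", 40), ("chol", 200)], [("age", 25), ("chol", 310)]]
def Spec_calculate_min_max_ranges (data : List (List (String × Int))) (out : Int × Int × Int × Int) : Prop := out = calculate_min_max_ranges_alt data
instance (data : List (List (String × Int))) (out : Int × Int × Int × Int) : Decidable (Spec_calculate_min_max_ranges data out) := by unfold Spec_calculate_min_max_ranges; infer_instance

-- ===== CLAIM (what is proved, stated in full; the proofs are below) =====
def Claim_equal_calculate_min_max_ranges : Prop := ∀ (data : List (List (String × Int))), Dom_calculate_min_max_ranges data → Pre_calculate_min_max_ranges data → Spec_calculate_min_max_ranges data (calculate_min_max_ranges data)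

-- ===== LEMMAS AND PROOFS =====

theorem foldA_minmax (l : List (List (String × Int))) (s : Int × Int × Int × Int) :
    l.foldl (fun s patient =>
      let age := pvKeyA patient "age"
      let chol := pvKeyA patient "chol"
      let mia := if age < s.1 then age else s.1
      let maa := if age > s.2.1 then age else s.2.1
      let mic := if chol < s.2.2.1 then chol else s.2.2.1
      let mac := if chol > s.2.2.2 then chol else s.2.2.2
      (mia, maa, mic, mac)) s
    = (l.foldl (fun m p => min m (pvKeyA p "age")) s.1,
       l.foldl (fun m p => max m (pvKeyA p "age")) s.2.1,
       l.foldl (fun m p => min m (pvKeyA p "chol")) s.2.2.1,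
       l.foldl (fun m p => max m (pvKeyA p "chol")) s.2.2.2) := by
  induction l generalizing s with
  | nil => rfl
  | cons p t ih =>
      have hmin : ∀ m a : Int, (if a < m then a else m) = min m a := by
        intro m a; split <;> omega
      have hmax : ∀ m a : Int, (if a > m then a else m) = max m a := by
        intro m a; split <;> omega
      rw [List.foldl_cons, ih]
      simp only [hmin, hmax, List.foldl_cons]

-- ===== VERDICT =====
theorem calculate_min_max_ranges_spec : Claim_equal_calculate_min_max_ranges := by
  intro data _ hpre
  obtain ⟨hne, _⟩ := hpre
  obtain ⟨p0, t, rfl⟩ := List.exists_cons_of_ne_nil hne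
  show _ = _
  simp only [calculate_min_max_ranges, calculate_min_max_ranges_alt, List.headD_cons,
    List.map_cons, PySem.List.min?_id_cons, PySem.List.max?_id_cons, Option.getD_some,
    List.foldl_cons, List.foldl_map]
  rw [foldA_minmax]
  have h1 : ∀ a : Int, (if a < a then a else a) = a := by intro a; omega
  simp only [h1]
  rfl
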